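-- pv_equiv track=rewrite | github.com/ttfnrob/astropipeline | astroagent/agents/reporter.py | _format_results_section
-- ===== SOURCE A (Python) =====
-- def _format_results_section(results_content: str) -> str:
--     """Format results section from results.md content."""
--     if not results_content:
--         return "Results analysis is pending completion."
--
--     # Extract relevant sections from results
--     lines = results_content.split('\n')
--     formatted_results = []
--
--     in_summary = False
--     in_limitations = False
--
--     for line in lines:
--         if line.startswith('## Summary'):
--             in_summary = True
--             formatted_results.append("### Primary Findings")
--             continue
--         elif line.startswith('## Figures') or line.startswith('## Tables'):
--             in_summary = False
--             formatted_results.append("### " + line[3:])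
--             continue
--         elif line.startswith('## Limitations'):
--             in_limitations = True
--             break
--         elif line.startswith('##'):
--             in_summary = False
--             formatted_results.append("### " + line[3:])
--             continue
--
--         if in_summary and line.strip():
--             formatted_results.append(line)
--
--     return '\n'.join(formatted_results) if formatted_results else results_content
-- ===== SOURCE B (Python) =====
-- def _format_results_section(results_content: str) -> str:
--     """Format results section from results.md content."""
--     if not results_content:
--         return "Results analysis is pending completion."
--
--     # Pass 1: collect (header, body-lines) sections, truncating at '## Limitations'.
--     sections = []
--     for line in results_content.split('\n'):
--         if line.startswith('## Limitations'):
--             break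
--         if line.startswith('##'):
--             sections.append((line, []))
--         elif sections:
--             sections[-1][1].append(line)
--
--     if not sections:
--         return results_content
--
--     # Pass 2: render headers; only Summary sections keep their non-blank body.
--     parts = []
--     for header, body in sections:
--         if header.startswith('## Summary'):
--             parts.append("### Primary Findings")
--             parts.extend(l for l in body if l.strip())
--         else:
--             parts.append("### " + header[3:])
--     return '\n'.join(parts)
-- ===== Notes on version B (the rewrite author's own statement) =====
-- stated objective: alternative
-- what changed: Replaced the single stateful loop (in_summary flag, interleaved emission) by two passes: first collect (header, body) sections truncating at '## Limitations', then render each section, keeping non-blank body lines only for Summary sections.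
import Mathlib
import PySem

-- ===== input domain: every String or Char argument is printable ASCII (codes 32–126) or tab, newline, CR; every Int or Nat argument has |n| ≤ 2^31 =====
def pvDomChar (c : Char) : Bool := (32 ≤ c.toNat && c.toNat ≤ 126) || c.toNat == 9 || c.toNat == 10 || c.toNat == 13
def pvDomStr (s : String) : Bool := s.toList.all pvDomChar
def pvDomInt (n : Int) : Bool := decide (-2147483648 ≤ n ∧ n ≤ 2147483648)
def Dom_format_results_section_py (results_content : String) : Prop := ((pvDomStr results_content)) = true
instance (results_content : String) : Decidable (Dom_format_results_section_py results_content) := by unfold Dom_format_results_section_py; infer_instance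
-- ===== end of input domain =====

-- B replaces A's single stateful loop by two passes (collect sections, then render them); same cost, different decomposition.

-- ===== PORT A =====
-- A's for-loop over the lines: state = (in_summary, accumulated output lines); '## Limitations' breaks.
def pvAStep : List String → Bool → List String → List String
  | [], _, acc => acc
  | l :: ls, insum, acc =>
    if PySem.Str.startswith l "## Summary" then
      pvAStep ls true (acc ++ ["### Primary Findings"])
    else if PySem.Str.startswith l "## Figures" || PySem.Str.startswith l "## Tables" then
      pvAStep ls false (acc ++ ["### " ++ PySem.Str.slice l (some 3) none])
    else if PySem.Str.startswith l "## Limitations" then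
      acc
    else if PySem.Str.startswith l "##" then
      pvAStep ls false (acc ++ ["### " ++ PySem.Str.slice l (some 3) none])
    else
      pvAStep ls insum (if insum && (PySem.Str.strip l != "") then acc ++ [l] else acc)

def format_results_section_py (results_content : String) : String :=
  if results_content = "" then "Results analysis is pending completion."
  else
    let lines := (PySem.Str.split? results_content "\n").getD []
    let formatted := pvAStep lines false []
    if formatted = [] then results_content else PySem.Str.join "\n" formatted

-- ===== PORT B =====
-- sections[-1][1].append(line): replace the last section's body by body ++ [line].
def pvBAppendLast : List (String × List String) → String → List (String × List String)
  | [], _ => []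
  | (h, b) :: rest, l => if rest = [] then [(h, b ++ [l])] else (h, b) :: pvBAppendLast rest l

-- Pass 1: collect (header, body) sections, truncating at '## Limitations'.
def pvBCollect : List String → List (String × List String) → List (String × List String)
  | [], secs => secs
  | l :: ls, secs =>
    if PySem.Str.startswith l "## Limitations" then secs
    else if PySem.Str.startswith l "##" then pvBCollect ls (secs ++ [(l, [])])
    else if secs = [] then pvBCollect ls secs
    else pvBCollect ls (pvBAppendLast secs l)

-- Pass 2: render each section; only Summary sections keep their non-blank body lines.
def pvBRender : List (String × List String) → List String
  | [] => []
  | (h, b) :: rest =>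
    (if PySem.Str.startswith h "## Summary" then
      "### Primary Findings" :: b.filter (fun x => PySem.Str.strip x != "")
    else
      ["### " ++ PySem.Str.slice h (some 3) none]) ++ pvBRender rest

def format_results_section_py_alt (results_content : String) : String :=
  if results_content = "" then "Results analysis is pending completion."
  else
    let secs := pvBCollect ((PySem.Str.split? results_content "\n").getD []) []
    if secs = [] then results_content
    else PySem.Str.join "\n" (pvBRender secs)

-- ===== PRECONDITION & SPEC =====
def Spec_format_results_section_py (results_content : String) (out : String) : Prop := out = format_results_section_py_alt results_content
instance (results_content : String) (out : String) : Decidable (Spec_format_results_section_py results_content out) := by unfold Spec_format_results_section_py; infer_instance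

-- ===== CLAIM (what is proved, stated in full; the proofs are below) =====
def Claim_equal_format_results_section_py : Prop := ∀ (results_content : String), Dom_format_results_section_py results_content → Spec_format_results_section_py results_content (format_results_section_py results_content)

-- ===== LEMMAS AND PROOFS =====

-- startswith on two incompatible literal prefixes cannot both hold.
theorem pvExcl (l p q : String) (hpq : ¬ (p.toList <+: q.toList)) (hqp : ¬ (q.toList <+: p.toList))
    (h : PySem.Str.startswith l p = true) : PySem.Str.startswith l q = false := by
  simp only [PySem.Str.startswith_eq, PySem.Chars.startswith] at *
  rw [Bool.eq_false_iff]
  intro hq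
  rw [List.isPrefixOf_iff_prefix] at h hq
  rcases List.prefix_or_prefix_of_prefix h hq with h' | h' <;> [exact hpq h'; exact hqp h']

-- startswith is monotone in the prefix.
theorem pvMono (l p q : String) (hq : q.toList <+: p.toList)
    (h : PySem.Str.startswith l p = true) : PySem.Str.startswith l q = true := by
  simp only [PySem.Str.startswith_eq, PySem.Chars.startswith, List.isPrefixOf_iff_prefix] at *
  exact hq.trans h

theorem pvMono' (l p q : String) (hq : q.toList <+: p.toList)
    (h : PySem.Str.startswith l q = false) : PySem.Str.startswith l p = false := by
  rw [Bool.eq_false_iff] at h ⊢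
  exact fun hp => h (pvMono l p q hq hp)

-- Accumulator-free view of A's loop.
def pvARun : List String → Bool → List String
  | [], _ => []
  | l :: ls, insum =>
    if PySem.Str.startswith l "## Summary" then
      "### Primary Findings" :: pvARun ls true
    else if PySem.Str.startswith l "## Figures" || PySem.Str.startswith l "## Tables" then
      ("### " ++ PySem.Str.slice l (some 3) none) :: pvARun ls false
    else if PySem.Str.startswith l "## Limitations" then
      []
    else if PySem.Str.startswith l "##" then
      ("### " ++ PySem.Str.slice l (some 3) none) :: pvARun ls false
    else
      (if insum && (PySem.Str.strip l != "") then [l] else []) ++ pvARun ls insum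

theorem pvAStep_eq : ∀ (ls : List String) (insum : Bool) (acc : List String),
    pvAStep ls insum acc = acc ++ pvARun ls insum := by
  intro ls
  induction ls with
  | nil => intro insum acc; simp [pvAStep, pvARun]
  | cons l ls ih =>
    intro insum acc
    simp only [pvAStep, pvARun]
    split_ifs <;> simp [ih]

-- Structural view of B's first pass: one section being gathered, and the skip mode.
def pvBSec : String → List String → List String → List (String × List String)
  | h, b, [] => [(h, b)]
  | h, b, l :: ls =>
    if PySem.Str.startswith l "## Limitations" then [(h, b)]
    else if PySem.Str.startswith l "##" then (h, b) :: pvBSec l [] ls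
    else pvBSec h (b ++ [l]) ls

def pvBSkip : List String → List (String × List String)
  | [] => []
  | l :: ls =>
    if PySem.Str.startswith l "## Limitations" then []
    else if PySem.Str.startswith l "##" then pvBSec l [] ls
    else pvBSkip ls

theorem pvBAppendLast_concat : ∀ (secs : List (String × List String)) (h : String) (b : List String) (l : String),
    pvBAppendLast (secs ++ [(h, b)]) l = secs ++ [(h, b ++ [l])] := by
  intro secs
  induction secs with
  | nil => intro h b l; simp [pvBAppendLast]
  | cons s ss ih =>
    intro h b l
    obtain ⟨sh, sb⟩ := s
    simp [pvBAppendLast, ih]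

theorem pvBCollect_concat : ∀ (ls : List String) (secs : List (String × List String)) (h : String) (b : List String),
    pvBCollect ls (secs ++ [(h, b)]) = secs ++ pvBSec h b ls := by
  intro ls
  induction ls with
  | nil => intro secs h b; simp [pvBCollect, pvBSec]
  | cons l ls ih =>
    intro secs h b
    simp only [pvBCollect, pvBSec]
    split_ifs with h1 h2 h3
    · rfl
    · rw [show secs ++ [(h, b)] ++ [(l, [])] = (secs ++ [(h, b)]) ++ [(l, [])] from rfl,
        ih (secs ++ [(h, b)]) l []]
      simp
    · simp at h3
    · rw [pvBAppendLast_concat, ih]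

theorem pvBCollect_nil : ∀ (ls : List String), pvBCollect ls [] = pvBSkip ls := by
  intro ls
  induction ls with
  | nil => rfl
  | cons l ls ih =>
    simp only [pvBCollect, pvBSkip]
    split_ifs with h1 h2
    · rfl
    · rw [show ([] : List (String × List String)) ++ [(l, [])] = [(l, [])] from rfl] at *
      have := pvBCollect_concat ls [] l []
      simpa using this
    · exact ih

-- Rendering a gathered section equals A's remaining output while inside that section.
theorem pvRenderSec : ∀ (ls : List String) (h : String) (b : List String),
    pvBRender (pvBSec h b ls) =
      (if PySem.Str.startswith h "## Summary" then
        "### Primary Findings" :: b.filter (fun x => PySem.Str.strip x != "")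
      else
        ["### " ++ PySem.Str.slice h (some 3) none]) ++ pvARun ls (PySem.Str.startswith h "## Summary") := by
  intro ls
  induction ls with
  | nil => intro h b; simp [pvBSec, pvBRender, pvARun]
  | cons l ls ih =>
    intro h b
    simp only [pvBSec]
    by_cases hlim : PySem.Str.startswith l "## Limitations" = true
    · have hs : PySem.Str.startswith l "## Summary" = false :=
        pvExcl l "## Limitations" "## Summary" (by decide) (by decide) hlim
      have hf : PySem.Str.startswith l "## Figures" = false :=
        pvExcl l "## Limitations" "## Figures" (by decide) (by decide) hlim
      have ht : PySem.Str.startswith l "## Tables" = false :=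
        pvExcl l "## Limitations" "## Tables" (by decide) (by decide) hlim
      simp [hlim, hs, hf, ht, pvBRender, pvARun, -PySem.Str.startswith_eq]
    · by_cases hh : PySem.Str.startswith l "##" = true
      · -- header: A emits its converted header and switches in_summary.
        rw [if_neg hlim, if_pos hh]
        show pvBRender ((h, b) :: pvBSec l [] ls) = _
        simp only [pvBRender, ih l []]
        by_cases hs : PySem.Str.startswith l "## Summary" = true
        · simp [pvARun, hs, -PySem.Str.startswith_eq]
        · by_cases hft : (PySem.Str.startswith l "## Figures" || PySem.Str.startswith l "## Tables") = true
          · have hlim' : PySem.Str.startswith l "## Limitations" = false := by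
              rwa [Bool.not_eq_true] at hlim
            simp [pvARun, hs, hft, -PySem.Str.startswith_eq]
          · have hlim' : PySem.Str.startswith l "## Limitations" = false := by
              rwa [Bool.not_eq_true] at hlim
            simp [pvARun, hs, hft, hh, hlim', -PySem.Str.startswith_eq]
      · -- body line
        have hh' : PySem.Str.startswith l "##" = false := by rwa [Bool.not_eq_true] at hh
        have hs : PySem.Str.startswith l "## Summary" = false :=
          pvMono' l "## Summary" "##" (by decide) hh'
        have hf : PySem.Str.startswith l "## Figures" = false :=
          pvMono' l "## Figures" "##" (by decide) hh'
        have ht : PySem.Str.startswith l "## Tables" = false :=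
          pvMono' l "## Tables" "##" (by decide) hh'
        have hl : PySem.Str.startswith l "## Limitations" = false :=
          pvMono' l "## Limitations" "##" (by decide) hh'
        rw [if_neg hlim, if_neg hh]
        rw [ih h (b ++ [l])]
        by_cases hsum : PySem.Str.startswith h "## Summary" = true
        · by_cases hb : PySem.Str.strip l = ""
          · simp [pvARun, hsum, hb, hs, hf, ht, hl, hh', List.filter_append,
              -PySem.Str.startswith_eq]
          · simp [pvARun, hsum, hb, hs, hf, ht, hl, hh', List.filter_append,
              -PySem.Str.startswith_eq]
        · have hsum' : PySem.Str.startswith h "## Summary" = false := by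
            rwa [Bool.not_eq_true] at hsum
          simp [pvARun, hsum', hs, hf, ht, hl, hh', -PySem.Str.startswith_eq]

theorem pvRenderSkip : ∀ (ls : List String), pvBRender (pvBSkip ls) = pvARun ls false := by
  intro ls
  induction ls with
  | nil => rfl
  | cons l ls ih =>
    simp only [pvBSkip]
    by_cases hlim : PySem.Str.startswith l "## Limitations" = true
    · have hs : PySem.Str.startswith l "## Summary" = false :=
        pvExcl l "## Limitations" "## Summary" (by decide) (by decide) hlim
      have hf : PySem.Str.startswith l "## Figures" = false :=
        pvExcl l "## Limitations" "## Figures" (by decide) (by decide) hlim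
      have ht : PySem.Str.startswith l "## Tables" = false :=
        pvExcl l "## Limitations" "## Tables" (by decide) (by decide) hlim
      simp [hlim, hs, hf, ht, pvBRender, pvARun, -PySem.Str.startswith_eq]
    · by_cases hh : PySem.Str.startswith l "##" = true
      · rw [if_neg hlim, if_pos hh, pvRenderSec ls l []]
        by_cases hs : PySem.Str.startswith l "## Summary" = true
        · simp [pvARun, hs, -PySem.Str.startswith_eq]
        · by_cases hft : (PySem.Str.startswith l "## Figures" || PySem.Str.startswith l "## Tables") = true
          · simp [pvARun, hs, hft, -PySem.Str.startswith_eq]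
          · have hlim' : PySem.Str.startswith l "## Limitations" = false := by
              rwa [Bool.not_eq_true] at hlim
            simp [pvARun, hs, hft, hh, hlim', -PySem.Str.startswith_eq]
      · have hs : PySem.Str.startswith l "## Summary" = false :=
          pvMono' l "## Summary" "##" (by decide) (by rwa [Bool.not_eq_true] at hh)
        have hf : PySem.Str.startswith l "## Figures" = false :=
          pvMono' l "## Figures" "##" (by decide) (by rwa [Bool.not_eq_true] at hh)
        have ht : PySem.Str.startswith l "## Tables" = false :=
          pvMono' l "## Tables" "##" (by decide) (by rwa [Bool.not_eq_true] at hh)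
        have hl : PySem.Str.startswith l "## Limitations" = false :=
          pvMono' l "## Limitations" "##" (by decide) (by rwa [Bool.not_eq_true] at hh)
        simp [hlim, hh, ih, pvARun, hs, hf, ht, -PySem.Str.startswith_eq]

theorem pvRender_nil_iff (secs : List (String × List String)) : pvBRender secs = [] ↔ secs = [] := by
  cases secs with
  | nil => simp [pvBRender]
  | cons s rest =>
    obtain ⟨h, b⟩ := s
    simp only [pvBRender]
    split_ifs <;> simp

-- ===== VERDICT (by name: the statement is the Claim_ definition above) =====
theorem format_results_section_py_spec : Claim_equal_format_results_section_py := by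
  intro s _
  unfold Spec_format_results_section_py format_results_section_py format_results_section_py_alt
  by_cases he : s = ""
  · simp [he]
  · simp only [if_neg he]
    have h1 : pvAStep ((PySem.Str.split? s "\n").getD []) false [] = pvARun ((PySem.Str.split? s "\n").getD []) false := by
      simpa using pvAStep_eq ((PySem.Str.split? s "\n").getD []) false []
    have h2 : pvBCollect ((PySem.Str.split? s "\n").getD []) [] = pvBSkip ((PySem.Str.split? s "\n").getD []) :=
      pvBCollect_nil _
    have h3 : pvBRender (pvBSkip ((PySem.Str.split? s "\n").getD [])) = pvARun ((PySem.Str.split? s "\n").getD []) false :=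
      pvRenderSkip _
    rw [h1, h2]
    by_cases hn : pvBSkip ((PySem.Str.split? s "\n").getD []) = []
    · rw [if_pos hn, if_pos (by rw [← h3, hn]; rfl)]
    · rw [if_neg hn, if_neg (by rw [← h3]; simpa [pvRender_nil_iff] using hn), h3]
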